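-- pv_equiv track=rewrite | github.com/servais1983/Osiris | collectors/linux/services.py | _assess_service_risk
-- ===== SOURCE A (Python) =====
-- from typing import Dict, List, Any
--
-- def _assess_service_risk(flags: List[str]) -> str:
--     """Évalue le niveau de risque d'un service"""
--     high_risk_flags = [
--         "Nom suspect:",
--         "Description suspecte:",
--         "ExecStart suspect:",
--         "Contenu du script suspect"
--     ]
--
--     medium_risk_flags = [
--         "Service non standard"
--     ]
--
--     if any(any(high_flag in flag for high_flag in high_risk_flags) for flag in flags):
--         return 'high'
--     elif any(any(medium_flag in flag for medium_flag in medium_risk_flags) for flag in flags):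
--         return 'medium'
--     else:
--         return 'low'
-- ===== SOURCE B (Python) =====
-- def _assess_service_risk(flags):
--     """Single short-circuiting pass: return 'high' at the first high-risk flag,
--     remember whether a medium-risk flag was seen, decide after the loop."""
--     saw_medium = False
--     for flag in flags:
--         if ("Nom suspect:" in flag or "Description suspecte:" in flag
--                 or "ExecStart suspect:" in flag or "Contenu du script suspect" in flag):
--             return 'high'
--         if "Service non standard" in flag:
--             saw_medium = True
--     return 'medium' if saw_medium else 'low'
-- ===== Notes on version B (the rewrite author's own statement) =====
-- stated objective: alternative
-- what changed: Replaces the two full any()-scans over flags with one short-circuiting loop that returns 'high' immediately and tracks a saw_medium boolean, deciding medium/low after the loop.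
import Mathlib
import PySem

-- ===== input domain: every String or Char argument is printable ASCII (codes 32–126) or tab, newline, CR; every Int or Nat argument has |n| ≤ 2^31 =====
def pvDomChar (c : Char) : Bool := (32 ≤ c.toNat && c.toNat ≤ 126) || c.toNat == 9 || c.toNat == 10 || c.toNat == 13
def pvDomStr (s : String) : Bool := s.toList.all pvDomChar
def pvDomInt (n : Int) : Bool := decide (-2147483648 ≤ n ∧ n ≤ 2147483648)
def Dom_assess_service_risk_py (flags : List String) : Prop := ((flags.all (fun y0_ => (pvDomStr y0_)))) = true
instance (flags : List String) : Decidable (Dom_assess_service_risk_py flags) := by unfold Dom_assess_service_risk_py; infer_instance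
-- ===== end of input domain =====

-- B replaces A's two full any()-scans with one short-circuiting pass carrying a saw_medium flag (alternative decomposition, same cost).

-- ===== PORT A =====
def pvHighRiskFlags : List String :=
  ["Nom suspect:", "Description suspecte:", "ExecStart suspect:", "Contenu du script suspect"]

def pvMediumRiskFlags : List String := ["Service non standard"]

def assess_service_risk_py (flags : List String) : String :=
  if flags.any (fun flag => pvHighRiskFlags.any (fun h => PySem.Str.isIn h flag)) then
    "high"
  else if flags.any (fun flag => pvMediumRiskFlags.any (fun m => PySem.Str.isIn m flag)) then
    "medium"
  else
    "low"

-- ===== PORT B =====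
-- single pass: return "high" at once, otherwise record medium and decide after the loop
def pvRiskLoop (flags : List String) (sawMedium : Bool) : String :=
  match flags with
  | [] => if sawMedium then "medium" else "low"
  | flag :: rest =>
    if PySem.Str.isIn "Nom suspect:" flag || PySem.Str.isIn "Description suspecte:" flag
        || PySem.Str.isIn "ExecStart suspect:" flag || PySem.Str.isIn "Contenu du script suspect" flag then
      "high"
    else if PySem.Str.isIn "Service non standard" flag then
      pvRiskLoop rest true
    else
      pvRiskLoop rest sawMedium

def assess_service_risk_py_alt (flags : List String) : String :=
  pvRiskLoop flags false

-- ===== PRECONDITION & SPEC =====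
def Spec_assess_service_risk_py (flags : List String) (out : String) : Prop := out = assess_service_risk_py_alt flags
instance (flags : List String) (out : String) : Decidable (Spec_assess_service_risk_py flags out) := by unfold Spec_assess_service_risk_py; infer_instance

-- ===== CLAIM (what is proved, stated in full; the proofs are below) =====
def Claim_equal_assess_service_risk_py : Prop := ∀ (flags : List String), Dom_assess_service_risk_py flags → Spec_assess_service_risk_py flags (assess_service_risk_py flags)

-- ===== LEMMAS AND PROOFS =====

-- B's single-flag conditions equal A's list-scans over the keyword lists
theorem pvHighCond_eq (flag : String) :
    (PySem.Str.isIn "Nom suspect:" flag || PySem.Str.isIn "Description suspecte:" flag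
      || PySem.Str.isIn "ExecStart suspect:" flag || PySem.Str.isIn "Contenu du script suspect" flag)
    = pvHighRiskFlags.any (fun h => PySem.Str.isIn h flag) := by
  simp [pvHighRiskFlags, Bool.or_assoc]

theorem pvMedCond_eq (flag : String) :
    PySem.Str.isIn "Service non standard" flag = pvMediumRiskFlags.any (fun m => PySem.Str.isIn m flag) := by
  simp [pvMediumRiskFlags]

-- characterisation of B's loop in terms of A's two scans
theorem pvRiskLoop_eq (flags : List String) (sm : Bool) :
    pvRiskLoop flags sm =
      if flags.any (fun flag => pvHighRiskFlags.any (fun h => PySem.Str.isIn h flag)) then "high"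
      else if sm || flags.any (fun flag => pvMediumRiskFlags.any (fun m => PySem.Str.isIn m flag)) then "medium"
      else "low" := by
  induction flags generalizing sm with
  | nil => cases sm <;> simp [pvRiskLoop]
  | cons flag rest ih =>
    simp only [pvRiskLoop, pvHighCond_eq, pvMedCond_eq, List.any_cons]
    by_cases hH : (pvHighRiskFlags.any (fun h => PySem.Str.isIn h flag)) = true
    · rw [if_pos hH, if_pos (by rw [hH, Bool.true_or])]
    · have hH' : (pvHighRiskFlags.any (fun h => PySem.Str.isIn h flag)) = false := by
        simpa using hH
      rw [if_neg hH]
      by_cases hM : (pvMediumRiskFlags.any (fun m => PySem.Str.isIn m flag)) = true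
      · rw [if_pos hM, ih]
        simp only [hH', hM, Bool.false_or, Bool.true_or, Bool.or_true]
      · have hM' : (pvMediumRiskFlags.any (fun m => PySem.Str.isIn m flag)) = false := by
          simpa using hM
        rw [if_neg hM, ih]
        simp only [hH', hM', Bool.false_or]

-- ===== VERDICT (by name: the statement is the Claim_ definition above) =====
theorem assess_service_risk_py_spec : Claim_equal_assess_service_risk_py := by
  intro flags _
  unfold Spec_assess_service_risk_py assess_service_risk_py assess_service_risk_py_alt
  rw [pvRiskLoop_eq]
  simp
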